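-- pv_equiv track=rewrite | github.com/Spawn12/Python_Basics | Strings_Assignment.py | func
-- ===== SOURCE A (Python) =====
-- def func(s,correct_spelled):
--     words=s.strip().split()
--     output_str=""
--     for current_word in words:
--         if len(current_word)<=2 or (current_word in correct_spelled) :
--             output_str=output_str+" "+current_word
--             continue
--         min_mismatch=2
--         replacement_word=current_word
--         for correct_word in correct_spelled:
--             if min(_find_mismatch(current_word,correct_word), _single_insert_or_delete(current_word,correct_word))==1:
--                 replacement_word=correct_word
--                 break
--         output_str=output_str+" "+replacement_word
--     return output_str.strip().lower()
--
-- def _find_mismatch(s1,s2):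
--     if len(s1) != len(s2):
--         return 2
--     s1=s1.lower()
--     s2=s2.lower()
--     number_of_mismatches=0
--     for index in range(len(s1)):
--         if s1[index] != s2[index]:
--             number_of_mismatches=number_of_mismatches+1
--             if number_of_mismatches>1:
--                 return 2
--     return number_of_mismatches
--
-- def _single_insert_or_delete(s1,s2):
--     s1=s1.lower()
--     s2=s2.lower()
--     if s1==s2:
--         return 0
--     if abs(len(s1)-len(s2))!=1:
--         return 2
--
--     if len(s1)>len(s2):
--         # only deletion is possible
--         for k in range(len(s2)):
--             if s1[k]!=s2[k]:
--                 if s1[k+1:]==s2[k:]: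
--                     return 1
--                 else:
--                     return 2
--         return 1
--     else: # s1 is shorter Only insertion is possible
--         for k in range(len(s1)):
--             if s1[k]!=s2[k]:
--                 if s1[k:]==s2[k+1:]:
--                     return 1
--                 else:
--                     return 2
--         return 1
-- ===== SOURCE B (Python) =====
-- def func(s, correct_spelled):
--     # Precompute, once, hash indexes of the lowercased dictionary:
--     #   exact:   lowercased word           -> first index
--     #   delete1: word with one char removed -> first index
--     #   subst:   (position, word without that char) -> entries (index, removed char) in index order
--     exact = {}
--     delete1 = {}
--     subst = {}
--     maxlen = 0
--     for j, d in enumerate(correct_spelled):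
--         dl = d.lower()
--         exact.setdefault(dl, j)
--         if len(dl) > maxlen:
--             maxlen = len(dl)
--         for i in range(len(dl)):
--             v = dl[:i] + dl[i + 1:]
--             delete1.setdefault(v, j)
--             subst.setdefault((i, v), []).append((j, dl[i]))
--     out = []
--     for w in s.strip().split():
--         if len(w) <= 2 or w in correct_spelled:
--             out.append(w)
--             continue
--         wl = w.lower()
--         if len(wl) > maxlen + 1:        # no dictionary word is long enough to be within distance 1
--             out.append(w)
--             continue
--         best = delete1.get(wl)          # dict word = wl plus one inserted char
--         for i in range(len(wl)):
--             v = wl[:i] + wl[i + 1:]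
--             j = exact.get(v)            # dict word = wl with wl[i] deleted
--             if j is not None and (best is None or j < best):
--                 best = j
--             for j, c in subst.get((i, v), ()):   # dict word = wl with wl[i] substituted
--                 if c != wl[i]:
--                     if best is None or j < best:
--                         best = j
--                     break
--         out.append(w if best is None else correct_spelled[best])
--     return " ".join(out).strip().lower()
-- ===== Notes on version B (the rewrite author's own statement) =====
-- stated objective: faster
-- what changed: A scans the whole dictionary per word, running two edit-distance tests on every (word, dict word) pair; B instead builds hash indexes of the lowercased dictionary once (exact words, one-char-deletion variants, (position, variant) buckets with the removed char, plus the maximum word length) and answers each word by dictionary lookups of the word's own deletion variants — skipped entirely when the word is longer than every dictionary word + 1 — taking the minimum index found, so no per-word dictionary scan remains.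
import Mathlib
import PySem

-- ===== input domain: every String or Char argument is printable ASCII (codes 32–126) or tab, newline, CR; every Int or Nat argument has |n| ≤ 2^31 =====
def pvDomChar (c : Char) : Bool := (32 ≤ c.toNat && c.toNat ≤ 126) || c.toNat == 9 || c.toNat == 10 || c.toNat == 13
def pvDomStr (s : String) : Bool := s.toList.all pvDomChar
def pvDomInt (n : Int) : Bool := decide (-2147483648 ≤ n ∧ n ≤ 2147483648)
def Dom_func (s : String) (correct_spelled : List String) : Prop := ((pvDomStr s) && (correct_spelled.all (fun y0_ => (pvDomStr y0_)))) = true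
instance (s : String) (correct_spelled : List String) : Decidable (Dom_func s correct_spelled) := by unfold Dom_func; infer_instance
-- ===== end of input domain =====

-- B replaces A's per-word scan of the whole dictionary (two edit-distance tests per pair) by hash
-- indexes of the lowercased dictionary built once (word, deletion variants, (position, variant)
-- buckets), answering each word by lookups of its own deletion variants; objective: faster.

-- ===== PORT A =====
-- _find_mismatch's "for index in range(len(s1))" loop (indices are always in range; getD is exact there)
def pvFmLoop (a b : List Char) (i : Nat) (cnt : Int) : Int :=
  if _h : i < a.length then
    if a.getD i ' ' ≠ b.getD i ' ' then
      if cnt + 1 > 1 then 2 else pvFmLoop a b (i + 1) (cnt + 1)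
    else pvFmLoop a b (i + 1) cnt
  else cnt
termination_by a.length - i

def pvFindMismatch (s1 s2 : List Char) : Int :=
  if s1.length ≠ s2.length then 2
  else pvFmLoop (PySem.Chars.lower s1) (PySem.Chars.lower s2) 0 0

-- deletion loop of _single_insert_or_delete; s1[k+1:] / s2[k:] with k ≥ 0 are List.drop
def pvSidDelLoop (a b : List Char) (k : Nat) : Int :=
  if _h : k < b.length then
    if a.getD k ' ' ≠ b.getD k ' ' then
      if a.drop (k + 1) == b.drop k then 1 else 2
    else pvSidDelLoop a b (k + 1)
  else 1
termination_by b.length - k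

-- insertion loop of _single_insert_or_delete
def pvSidInsLoop (a b : List Char) (k : Nat) : Int :=
  if _h : k < a.length then
    if a.getD k ' ' ≠ b.getD k ' ' then
      if a.drop k == b.drop (k + 1) then 1 else 2
    else pvSidInsLoop a b (k + 1)
  else 1
termination_by a.length - k

def pvSingleInsDel (s1 s2 : List Char) : Int :=
  let a := PySem.Chars.lower s1
  let b := PySem.Chars.lower s2
  if a == b then 0
  else if ((a.length : Int) - (b.length : Int)).natAbs ≠ 1 then 2
  else if a.length > b.length then pvSidDelLoop a b 0
  else pvSidInsLoop a b 0

-- A's inner "for correct_word in correct_spelled: … break" (replacement_word starts as current_word)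
def pvInnerA (w : List Char) : List String → List Char
  | [] => w
  | d :: rest =>
      if min (pvFindMismatch w d.toList) (pvSingleInsDel w d.toList) == 1 then d.toList
      else pvInnerA w rest

def func (s : String) (correct_spelled : List String) : String :=
  let words := PySem.Chars.split₀ (PySem.Chars.strip s.toList)
  let out := words.foldl (fun acc w =>
    if PySem.Chars.len w ≤ 2 || correct_spelled.any (fun d => d.toList == w)
    then acc ++ ' ' :: w
    else acc ++ ' ' :: pvInnerA w correct_spelled) ([] : List Char)
  String.ofList (PySem.Chars.lower (PySem.Chars.strip out))

-- ===== PORT B =====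
-- "exact.setdefault(dl, j); if len(dl) > maxlen: maxlen = len(dl)" then
-- "for i in range(len(dl)): v = dl[:i] + dl[i+1:]; delete1.setdefault(v, j); subst.setdefault((i, v), []).append((j, dl[i]))"
-- (dl[i] with i from range(len(dl)) is always in range: pyGetD is exact there)
def pvBuildWord
    (st : PySem.Dict (List Char) Int × PySem.Dict (List Char) Int ×
          PySem.Dict (Int × List Char) (List (Int × Char)) × Int)
    (jd : Int × String) :
    PySem.Dict (List Char) Int × PySem.Dict (List Char) Int ×
      PySem.Dict (Int × List Char) (List (Int × Char)) × Int :=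
  let dl := PySem.Chars.lower jd.2.toList
  (PySem.List.pyRange 0 (PySem.Chars.len dl) 1).foldl
    (fun st i =>
      let v := PySem.List.slice dl none (some i) ++ PySem.List.slice dl (some (i + 1)) none
      (st.1, st.2.1.setdefault v jd.1,
       st.2.2.1.modify (i, v) [] (fun l => l ++ [(jd.1, PySem.List.pyGetD dl i ' ')]),
       st.2.2.2))
    (st.1.setdefault dl jd.1, st.2.1, st.2.2.1,
     if PySem.Chars.len dl > st.2.2.2 then PySem.Chars.len dl else st.2.2.2)

-- "if best is None or j < best: best = j"
def pvBestUpd (best : Option Int) (j : Int) : Option Int :=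
  match best with
  | none => some j
  | some b => if j < b then some j else some b

-- "for j, c in subst.get((i, v), ()): if c != wl[i]: …; break"
def pvSubScan (entries : List (Int × Char)) (c0 : Char) (best : Option Int) : Option Int :=
  match entries with
  | [] => best
  | (j, c) :: rest => if c ≠ c0 then pvBestUpd best j else pvSubScan rest c0 best

-- the per-word lookup loop: best = delete1.get(wl); for i in range(len(wl)): …
def pvLookup (wl : List Char)
    (ex d1 : PySem.Dict (List Char) Int)
    (sb : PySem.Dict (Int × List Char) (List (Int × Char))) : Option Int :=
  (PySem.List.pyRange 0 (PySem.Chars.len wl) 1).foldl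
    (fun best i =>
      let v := PySem.List.slice wl none (some i) ++ PySem.List.slice wl (some (i + 1)) none
      let best1 := match ex.get? v with
        | some j => pvBestUpd best j
        | none => best
      pvSubScan (sb.getD (i, v) []) (PySem.List.pyGetD wl i ' ') best1)
    (d1.get? wl)

def func_alt (s : String) (correct_spelled : List String) : String :=
  let st := (PySem.List.enumerate correct_spelled 0).foldl pvBuildWord
      (PySem.Dict.empty, PySem.Dict.empty, PySem.Dict.empty, 0)
  let pieces := (PySem.Chars.split₀ (PySem.Chars.strip s.toList)).map (fun w =>
    if PySem.Chars.len w ≤ 2 || correct_spelled.any (fun d => d.toList == w) then w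
    else if PySem.Chars.len (PySem.Chars.lower w) > st.2.2.2 + 1 then w
      -- no dictionary word is long enough to be within edit distance 1
    else
      match pvLookup (PySem.Chars.lower w) st.1 st.2.1 st.2.2.1 with
      | none => w
      | some j => (PySem.List.pyGetD correct_spelled j "").toList)  -- correct_spelled[best]: best is an enumerate index, always in range
  String.ofList (PySem.Chars.lower (PySem.Chars.strip (PySem.Chars.join [' '] pieces)))

-- ===== PRECONDITION & SPEC =====
def Spec_func (s : String) (correct_spelled : List String) (out : String) : Prop := out = func_alt s correct_spelled
instance (s : String) (correct_spelled : List String) (out : String) : Decidable (Spec_func s correct_spelled out) := by unfold Spec_func; infer_instance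

-- ===== CLAIM (what is proved, stated in full; the proofs are below) =====
def Claim_equal_func : Prop := ∀ (s : String) (correct_spelled : List String), Dom_func s correct_spelled → Spec_func s correct_spelled (func s correct_spelled)

-- ===== LEMMAS AND PROOFS =====

-- word with the character at position i removed (what dl[:i] + dl[i+1:] computes for 0 ≤ i < len dl)
def pvDel (l : List Char) (i : Nat) : List Char := l.take i ++ l.drop (i + 1)

-- proof-side: the built state and the lowercased dictionary
def pvBuildSt (cs : List String) :
    PySem.Dict (List Char) Int × PySem.Dict (List Char) Int ×
      PySem.Dict (Int × List Char) (List (Int × Char)) × Int :=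
  (PySem.List.enumerate cs 0).foldl pvBuildWord
    (PySem.Dict.empty, PySem.Dict.empty, PySem.Dict.empty, 0)

def pvLowers (cs : List String) : List (List Char) := cs.map (fun d => PySem.Chars.lower d.toList)

-- min of two optional indices (none = no candidate)
def pvOmin : Option Int → Option Int → Option Int
  | none, b => b
  | some a, none => some a
  | some a, some b => some (min a b)

-- "edit distance exactly 1 between w and d" (lowercased), as the lookup decomposes it
def Ed1 (w d : List Char) : Prop :=
  (∃ i, i < d.length ∧ pvDel d i = w) ∨
  (∃ i, i < w.length ∧ (d = pvDel w i ∨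
    (i < d.length ∧ pvDel d i = pvDel w i ∧ d.getD i ' ' ≠ w.getD i ' ')))

-- the same, as the Bool predicate the lookup computes
def pvBigPred (wl dl : List Char) : Bool :=
  ((List.range dl.length).any (fun i => pvDel dl i == wl)) ||
  (List.range wl.length).any (fun k =>
    (dl == pvDel wl k) ||
    (decide (k < dl.length ∧ pvDel dl k = pvDel wl k) && (dl.getD k ' ' != wl.getD k ' ')))

-- ---------- A-side distance machinery (characterisation of min(fm, sid) == 1) ----------

def fmP (a b : List Char) : Int := if a.length ≠ b.length then 2 else pvFmLoop a b 0 0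
def sidP (a b : List Char) : Int :=
  if a == b then 0
  else if ((a.length : Int) - (b.length : Int)).natAbs ≠ 1 then 2
  else if a.length > b.length then pvSidDelLoop a b 0
  else pvSidInsLoop a b 0

-- B-side-style direct distance test, used only as a proof-side middle man
def pvD1Loop (a b : List Char) (i : Nat) : Nat :=
  if _h : i < a.length ∧ i < b.length ∧ a.getD i ' ' = b.getD i ' ' then pvD1Loop a b (i + 1)
  else i
termination_by a.length - i
decreasing_by omega

def pvDist1 (a b : List Char) : Bool :=
  if ((a.length : Int) - (b.length : Int)).natAbs > 1 then false
  else
    let i := pvD1Loop a b 0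
    if i = a.length ∧ i = b.length then false
    else a.drop (i + 1) == b.drop (i + 1) || a.drop i == b.drop (i + 1) || a.drop (i + 1) == b.drop i

lemma length_lower (s : List Char) : (PySem.Chars.lower s).length = s.length := by
  simp [PySem.Chars.lower]

lemma fm_eq (w d : List Char) :
    pvFindMismatch w d = fmP (PySem.Chars.lower w) (PySem.Chars.lower d) := by
  simp [pvFindMismatch, fmP, length_lower]

lemma sid_eq (w d : List Char) :
    pvSingleInsDel w d = sidP (PySem.Chars.lower w) (PySem.Chars.lower d) := by
  simp [pvSingleInsDel, sidP]

lemma pvFmLoop_succ (x y : Char) (xs ys : List Char) (i : Nat) (cnt : Int) :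
    pvFmLoop (x :: xs) (y :: ys) (i + 1) cnt = pvFmLoop xs ys i cnt := by
  fun_induction pvFmLoop xs ys i cnt <;> (rw [pvFmLoop]; simp_all)

lemma pvSidDelLoop_succ (x y : Char) (xs ys : List Char) (k : Nat) :
    pvSidDelLoop (x :: xs) (y :: ys) (k + 1) = pvSidDelLoop xs ys k := by
  fun_induction pvSidDelLoop xs ys k <;> (rw [pvSidDelLoop]; simp_all)

lemma pvSidInsLoop_succ (x y : Char) (xs ys : List Char) (k : Nat) :
    pvSidInsLoop (x :: xs) (y :: ys) (k + 1) = pvSidInsLoop xs ys k := by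
  fun_induction pvSidInsLoop xs ys k <;> (rw [pvSidInsLoop]; simp_all)

lemma pvD1Loop_succ (x y : Char) (xs ys : List Char) (i : Nat) :
    pvD1Loop (x :: xs) (y :: ys) (i + 1) = pvD1Loop xs ys i + 1 := by
  fun_induction pvD1Loop xs ys i with
  | case1 i h ih =>
      rw [pvD1Loop, dif_pos (by simpa [List.getD_cons_succ] using h)]
      exact ih
  | case2 i h =>
      rw [pvD1Loop, dif_neg (by simpa [List.getD_cons_succ] using h)]

lemma pvFmLoop_one (a : List Char) : ∀ b : List Char, a.length = b.length →
    pvFmLoop a b 0 1 = if a = b then 1 else 2 := by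
  induction a with
  | nil =>
      intro b hb
      obtain rfl : b = [] := by simpa using (List.length_eq_zero_iff.mp hb.symm)
      rw [pvFmLoop]; simp
  | cons x xs ih =>
      intro b hb
      cases b with
      | nil => simp at hb
      | cons y ys =>
          rw [pvFmLoop]
          by_cases hxy : x = y
          · subst hxy
            simp only [List.length_cons, Nat.zero_lt_succ, dif_pos, List.getD_cons_zero,
              ne_eq, not_true_eq_false, if_false]
            rw [pvFmLoop_succ, ih ys (by simpa using hb)]
            simp
          · simp only [List.length_cons, Nat.zero_lt_succ, dif_pos, List.getD_cons_zero]
            rw [if_pos (by simpa using hxy), if_pos (by norm_num),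
              if_neg (by simp [hxy])]

lemma pvDist1_cons_eq (x : Char) (xs ys : List Char) :
    pvDist1 (x :: xs) (x :: ys) = pvDist1 xs ys := by
  have hg : (((x::xs).length : Int) - ((x::ys).length : Int)).natAbs
      = ((xs.length : Int) - (ys.length : Int)).natAbs := by
    simp
  have hl : pvD1Loop (x :: xs) (x :: ys) 0 = pvD1Loop xs ys 0 + 1 := by
    rw [pvD1Loop, dif_pos (by simp : 0 < (x::xs).length ∧ 0 < (x::ys).length ∧
      (x::xs).getD 0 ' ' = (x::ys).getD 0 ' ')]
    exact pvD1Loop_succ x x xs ys 0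
  simp only [pvDist1, hg, hl]
  split
  · rfl
  · simp only [List.length_cons, List.drop_succ_cons, Nat.add_right_cancel_iff]

lemma pvDist1_cons_ne (x y : Char) (xs ys : List Char) (hxy : x ≠ y) :
    pvDist1 (x :: xs) (y :: ys) = (xs == ys || (x :: xs) == ys || xs == (y :: ys)) := by
  have hl : pvD1Loop (x :: xs) (y :: ys) 0 = 0 := by
    rw [pvD1Loop, dif_neg (by simp [hxy])]
  simp only [pvDist1, hl]
  by_cases hg : (((x::xs).length : Int) - ((y::ys).length : Int)).natAbs > 1
  · rw [if_pos hg]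
    have h1 : xs ≠ ys := fun h => by have := congrArg List.length h; simp at this hg; omega
    have h2 : (x :: xs) ≠ ys := fun h => by have := congrArg List.length h; simp at this hg; omega
    have h3 : xs ≠ (y :: ys) := fun h => by have := congrArg List.length h; simp at this hg; omega
    simp [h1, h2, h3]
  · rw [if_neg hg, if_neg (by simp)]
    simp [List.drop_succ_cons]

lemma fmP_cons_eq (x : Char) (xs ys : List Char) : fmP (x::xs) (x::ys) = fmP xs ys := by
  by_cases hlen : xs.length = ys.length
  · have hstep : pvFmLoop (x::xs) (x::ys) 0 0 = pvFmLoop xs ys 0 0 := by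
      rw [pvFmLoop]
      simp only [List.length_cons, Nat.zero_lt_succ, dif_pos, List.getD_cons_zero,
        ne_eq, not_true_eq_false, if_false]
      exact pvFmLoop_succ x x xs ys 0 0
    simp only [fmP, List.length_cons]
    rw [if_neg (by simp [hlen]), if_neg (by simp [hlen]), hstep]
  · simp only [fmP, List.length_cons]
    rw [if_pos (by simp [hlen]), if_pos (by simp [hlen])]

lemma fmP_cons_ne (x y : Char) (xs ys : List Char) (hxy : x ≠ y) :
    fmP (x::xs) (y::ys) = if xs.length = ys.length then (if xs = ys then 1 else 2) else 2 := by
  by_cases hlen : xs.length = ys.length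
  · have hstep : pvFmLoop (x::xs) (y::ys) 0 0 = pvFmLoop xs ys 0 1 := by
      rw [pvFmLoop]
      simp only [List.length_cons, Nat.zero_lt_succ, dif_pos, List.getD_cons_zero]
      rw [if_pos (by simpa using hxy), if_neg (by norm_num)]
      exact pvFmLoop_succ x y xs ys 0 1
    simp only [fmP, List.length_cons]
    rw [if_neg (by simp [hlen]), if_pos hlen, hstep, pvFmLoop_one xs ys hlen]
  · simp only [fmP, List.length_cons]
    rw [if_pos (by simp [hlen]), if_neg hlen]

lemma sidP_cons_eq (x : Char) (xs ys : List Char) : sidP (x::xs) (x::ys) = sidP xs ys := by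
  by_cases heq : xs = ys
  · subst heq; simp [sidP]
  · have hdel : pvSidDelLoop (x::xs) (x::ys) 0 = pvSidDelLoop xs ys 0 := by
      rw [pvSidDelLoop]
      simp only [List.length_cons, Nat.zero_lt_succ, dif_pos, List.getD_cons_zero,
        ne_eq, not_true_eq_false, if_false]
      exact pvSidDelLoop_succ x x xs ys 0
    have hins : pvSidInsLoop (x::xs) (x::ys) 0 = pvSidInsLoop xs ys 0 := by
      rw [pvSidInsLoop]
      simp only [List.length_cons, Nat.zero_lt_succ, dif_pos, List.getD_cons_zero,
        ne_eq, not_true_eq_false, if_false]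
      exact pvSidInsLoop_succ x x xs ys 0
    have hne : (x::xs) ≠ (x::ys) := by simp [heq]
    simp only [sidP, beq_iff_eq, if_neg hne, if_neg heq, List.length_cons]
    simp only [Nat.cast_add, Nat.cast_one, add_sub_add_right_eq_sub, gt_iff_lt,
      Nat.add_lt_add_iff_right, hdel, hins]

lemma sidP_cons_ne (x y : Char) (xs ys : List Char) (hxy : x ≠ y) :
    sidP (x::xs) (y::ys) =
      if xs.length = ys.length + 1 then (if xs = y::ys then 1 else 2)
      else if ys.length = xs.length + 1 then (if x::xs = ys then 1 else 2)
      else 2 := by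
  have hne : (x::xs) ≠ (y::ys) := by simp [hxy]
  have hdel : pvSidDelLoop (x::xs) (y::ys) 0
      = if xs = y::ys then 1 else 2 := by
    rw [pvSidDelLoop]
    simp only [List.length_cons, Nat.zero_lt_succ, dif_pos, List.getD_cons_zero]
    rw [if_pos (by simpa using hxy)]
    simp [List.drop_succ_cons]
  have hins : pvSidInsLoop (x::xs) (y::ys) 0
      = if x::xs = ys then 1 else 2 := by
    rw [pvSidInsLoop]
    simp only [List.length_cons, Nat.zero_lt_succ, dif_pos, List.getD_cons_zero]
    rw [if_pos (by simpa using hxy)]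
    simp [List.drop_succ_cons]
  simp only [sidP, beq_iff_eq, if_neg hne, List.length_cons]
  by_cases h1 : xs.length = ys.length + 1
  · rw [if_neg (by omega), if_pos (by omega), hdel, if_pos h1]
  · by_cases h2 : ys.length = xs.length + 1
    · rw [if_neg (by omega), if_neg (by omega), hins, if_neg h1, if_pos h2]
    · rw [if_pos (by omega), if_neg h1, if_neg h2]

lemma fmP_nil_cons (y : Char) (ys : List Char) : fmP [] (y::ys) = 2 := by simp [fmP]
lemma fmP_cons_nil (x : Char) (xs : List Char) : fmP (x::xs) [] = 2 := by simp [fmP]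

lemma sidP_nil_cons (y : Char) (ys : List Char) :
    sidP [] (y::ys) = if ys = [] then 1 else 2 := by
  have hloop : pvSidInsLoop [] (y::ys) 0 = 1 := by rw [pvSidInsLoop]; simp
  by_cases hys : ys = []
  · subst hys; simp [sidP, hloop]
  · have hlp := List.length_pos_iff.mpr hys
    simp [sidP, hys]
    intro h
    exact absurd h (by omega)

lemma sidP_cons_nil (x : Char) (xs : List Char) :
    sidP (x::xs) [] = if xs = [] then 1 else 2 := by
  have hloop : pvSidDelLoop (x::xs) [] 0 = 1 := by rw [pvSidDelLoop]; simp
  by_cases hxs : xs = []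
  · subst hxs; simp [sidP, hloop]
  · have hlp := List.length_pos_iff.mpr hxs
    simp [sidP, hxs]
    intro h
    exact absurd h (by omega)

lemma pvDist1_nil_cons (y : Char) (ys : List Char) :
    pvDist1 [] (y::ys) = (ys == []) := by
  have hl : pvD1Loop [] (y::ys) 0 = 0 := by rw [pvD1Loop]; simp
  by_cases hys : ys = []
  · subst hys; simp [pvDist1, hl]
  · simp [pvDist1, hl, hys]

lemma pvDist1_cons_nil (x : Char) (xs : List Char) :
    pvDist1 (x::xs) [] = (xs == []) := by
  have hl : pvD1Loop (x::xs) [] 0 = 0 := by rw [pvD1Loop]; simp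
  by_cases hxs : xs = []
  · subst hxs; simp [pvDist1, hl]
  · simp [pvDist1, hl, hxs]

-- A's "min(find_mismatch, single_insert_or_delete) == 1" is the edit-distance-1 test
lemma pair_iff (a : List Char) : ∀ b : List Char,
    (min (fmP a b) (sidP a b) = 1) ↔ pvDist1 a b = true := by
  induction a with
  | nil =>
      intro b
      cases b with
      | nil =>
          have h1 : fmP [] [] = 0 := by
            simp only [fmP, List.length_nil, ne_eq, not_true_eq_false, if_false]
            rw [pvFmLoop]; simp
          have h3 : pvDist1 [] [] = false := by
            have hl : pvD1Loop [] [] 0 = 0 := by rw [pvD1Loop]; simp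
            simp [pvDist1, hl]
          rw [h1, h3, show sidP [] [] = 0 from by simp [sidP]]
          norm_num
      | cons y ys =>
          rw [fmP_nil_cons, sidP_nil_cons, pvDist1_nil_cons]
          by_cases hys : ys = [] <;> simp [hys]
  | cons x xs ih =>
      intro b
      cases b with
      | nil =>
          rw [fmP_cons_nil, sidP_cons_nil, pvDist1_cons_nil]
          by_cases hxs : xs = [] <;> simp [hxs]
      | cons y ys =>
          by_cases hxy : x = y
          · subst hxy
            rw [fmP_cons_eq, sidP_cons_eq, pvDist1_cons_eq]
            exact ih ys
          · rw [fmP_cons_ne x y xs ys hxy, sidP_cons_ne x y xs ys hxy,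
              pvDist1_cons_ne x y xs ys hxy]
            by_cases h0 : xs.length = ys.length
            · have hne2 : x::xs ≠ ys := fun h => by
                have := congrArg List.length h; simp at this; omega
              have hne3 : xs ≠ y::ys := fun h => by
                have := congrArg List.length h; simp at this; omega
              rw [if_pos h0, if_neg (show ¬ xs.length = ys.length + 1 by omega),
                if_neg (show ¬ ys.length = xs.length + 1 by omega)]
              by_cases hxsys : xs = ys <;> simp [hxsys, hne2, hne3]
            · have hne1 : xs ≠ ys := fun h => by
                have := congrArg List.length h; simp at this; omega
              by_cases h1 : xs.length = ys.length + 1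
              · have hne2 : x::xs ≠ ys := fun h => by
                  have := congrArg List.length h; simp at this; omega
                rw [if_neg h0, if_pos h1]
                by_cases hd : xs = y::ys <;> simp [hd, hne1, hne2]
              · by_cases h2 : ys.length = xs.length + 1
                · have hne3 : xs ≠ y::ys := fun h => by
                    have := congrArg List.length h; simp at this; omega
                  rw [if_neg h0, if_neg h1, if_pos h2]
                  by_cases hi : x::xs = ys <;> simp [hi, hne1, hne3]
                · have hne2 : x::xs ≠ ys := fun h => by
                    have := congrArg List.length h; simp at this; omega
                  have hne3 : xs ≠ y::ys := fun h => by
                    have := congrArg List.length h; simp at this; omega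
                  rw [if_neg h0, if_neg h1, if_neg h2]
                  simp [hne1, hne2, hne3]

-- ---------- pvDist1 ↔ Ed1 ----------

lemma pvDel_zero_cons (a : Char) (l : List Char) : pvDel (a :: l) 0 = l := by
  simp [pvDel]

lemma pvDel_succ_cons (a : Char) (l : List Char) (i : Nat) :
    pvDel (a :: l) (i + 1) = a :: pvDel l i := by
  simp [pvDel]

lemma pvDel_length {l : List Char} {i : Nat} (h : i < l.length) :
    (pvDel l i).length = l.length - 1 := by
  simp [pvDel]; omega

lemma Ed1_nil_cons (y : Char) (ys : List Char) : Ed1 [] (y::ys) ↔ ys = [] := by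
  constructor
  · rintro (⟨i, hi, hdel⟩ | ⟨i, hi, _⟩)
    · have hlen := congrArg List.length hdel
      rw [pvDel_length hi] at hlen
      simp at hlen
      exact hlen
    · simp at hi
  · rintro rfl
    exact Or.inl ⟨0, by simp, by rw [pvDel_zero_cons]⟩

lemma Ed1_cons_nil (x : Char) (xs : List Char) : Ed1 (x::xs) [] ↔ xs = [] := by
  constructor
  · rintro (⟨i, hi, _⟩ | ⟨i, hi, heq | ⟨hid, _, _⟩⟩)
    · simp at hi
    · have hlen := congrArg List.length heq
      rw [pvDel_length hi] at hlen
      simp at hlen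
      exact List.length_eq_zero_iff.mp hlen.symm
    · simp at hid
  · rintro rfl
    exact Or.inr ⟨0, by simp, Or.inl (by rw [pvDel_zero_cons])⟩

lemma Ed1_cons_eq (x : Char) (xs ys : List Char) : Ed1 (x::xs) (x::ys) ↔ Ed1 xs ys := by
  constructor
  · rintro (⟨i, hi, hdel⟩ | ⟨i, hi, heq | ⟨hid, hdeq, hne⟩⟩)
    · cases i with
      | zero =>
          rw [pvDel_zero_cons] at hdel
          refine Or.inl ⟨0, ?_, ?_⟩
          · rw [hdel]; simp
          · rw [hdel, pvDel_zero_cons]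
      | succ j =>
          rw [pvDel_succ_cons] at hdel
          exact Or.inl ⟨j, by simpa using hi, by injection hdel⟩
    · cases i with
      | zero =>
          rw [pvDel_zero_cons] at heq
          refine Or.inr ⟨0, ?_, Or.inl ?_⟩
          · rw [← heq]; simp
          · rw [← heq, pvDel_zero_cons]
      | succ j =>
          rw [pvDel_succ_cons] at heq
          exact Or.inr ⟨j, by simpa using hi, Or.inl (by injection heq)⟩
    · cases i with
      | zero =>
          exfalso
          simp at hne
      | succ j =>
          rw [pvDel_succ_cons, pvDel_succ_cons] at hdeq
          refine Or.inr ⟨j, by simpa using hi, Or.inr ⟨by simpa using hid, by injection hdeq,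
            by simpa [List.getD_cons_succ] using hne⟩⟩
  · rintro (⟨j, hj, hdel⟩ | ⟨j, hj, heq | ⟨hjd, hdeq, hne⟩⟩)
    · exact Or.inl ⟨j + 1, by simpa using hj, by rw [pvDel_succ_cons, hdel]⟩
    · exact Or.inr ⟨j + 1, by simpa using hj, Or.inl (by rw [pvDel_succ_cons, ← heq])⟩
    · exact Or.inr ⟨j + 1, by simpa using hj, Or.inr ⟨by simpa using hjd,
        by rw [pvDel_succ_cons, pvDel_succ_cons, hdeq],
        by simpa [List.getD_cons_succ] using hne⟩⟩

lemma Ed1_cons_ne (x y : Char) (xs ys : List Char) (hxy : x ≠ y) :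
    Ed1 (x::xs) (y::ys) ↔ (xs = ys ∨ x::xs = ys ∨ xs = y::ys) := by
  constructor
  · rintro (⟨i, hi, hdel⟩ | ⟨i, hi, heq | ⟨hid, hdeq, hne⟩⟩)
    · cases i with
      | zero =>
          rw [pvDel_zero_cons] at hdel
          exact Or.inr (Or.inl hdel.symm)
      | succ j =>
          rw [pvDel_succ_cons] at hdel
          exact absurd (show y = x by injection hdel) (Ne.symm hxy)
    · cases i with
      | zero =>
          rw [pvDel_zero_cons] at heq
          exact Or.inr (Or.inr heq.symm)
      | succ j =>
          rw [pvDel_succ_cons] at heq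
          exact absurd (show y = x by injection heq) (Ne.symm hxy)
    · cases i with
      | zero =>
          rw [pvDel_zero_cons, pvDel_zero_cons] at hdeq
          exact Or.inl hdeq.symm
      | succ j =>
          rw [pvDel_succ_cons, pvDel_succ_cons] at hdeq
          exact absurd (show y = x by injection hdeq) (Ne.symm hxy)
  · rintro (h | h | h)
    · refine Or.inr ⟨0, by simp, Or.inr ⟨by simp, ?_, ?_⟩⟩
      · rw [pvDel_zero_cons, pvDel_zero_cons, h]
      · simpa [List.getD_cons_zero] using (Ne.symm hxy)
    · exact Or.inl ⟨0, by simp, by rw [pvDel_zero_cons, ← h]⟩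
    · exact Or.inr ⟨0, by simp, Or.inl (by rw [pvDel_zero_cons, h])⟩

lemma Ed1_nil_nil : ¬ Ed1 [] [] := by
  rintro (⟨i, hi, _⟩ | ⟨i, hi, _⟩) <;> simp at hi

lemma dist1_iff (w : List Char) : ∀ d : List Char, pvDist1 w d = true ↔ Ed1 w d := by
  induction w with
  | nil =>
      intro d
      cases d with
      | nil =>
          have h3 : pvDist1 [] [] = false := by
            have hl : pvD1Loop [] [] 0 = 0 := by rw [pvD1Loop]; simp
            simp [pvDist1, hl]
          rw [h3]
          simp [Ed1_nil_nil]
      | cons y ys =>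
          rw [pvDist1_nil_cons, Ed1_nil_cons]
          simp
  | cons x xs ih =>
      intro d
      cases d with
      | nil =>
          rw [pvDist1_cons_nil, Ed1_cons_nil]
          simp
      | cons y ys =>
          by_cases hxy : x = y
          · subst hxy
            rw [pvDist1_cons_eq, Ed1_cons_eq]
            exact ih ys
          · rw [pvDist1_cons_ne x y xs ys hxy, Ed1_cons_ne x y xs ys hxy]
            simp [or_assoc]

lemma bigPred_iff (wl dl : List Char) : pvBigPred wl dl = true ↔ Ed1 wl dl := by
  unfold pvBigPred Ed1
  simp only [Bool.or_eq_true, List.any_eq_true, List.mem_range, beq_iff_eq,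
    Bool.and_eq_true, decide_eq_true_eq, bne_iff_ne, ne_eq]
  simp only [and_assoc]

lemma bigPred_eq_dist1 (wl dl : List Char) : pvBigPred wl dl = pvDist1 wl dl := by
  rw [Bool.eq_iff_iff, bigPred_iff, dist1_iff]

-- ---------- generic fold characterisations ----------

lemma get?_foldl_setdefault_key {ι : Type} (L : List ι) (key : ι → List Char) (n : Int)
    (d : PySem.Dict (List Char) Int) (v : List Char) :
    (L.foldl (fun d k => d.setdefault (key k) n) d).get? v
      = (d.get? v).or (if L.any (fun k => key k == v) then some n else none) := by
  induction L generalizing d with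
  | nil => simp
  | cons k L ih =>
      rw [List.foldl_cons, ih]
      by_cases hv : key k = v
      · rw [hv, PySem.Dict.get?_setdefault_self]
        cases hdv : d.get? v with
        | none => simp [hv]
        | some x => simp [hv]
      · rw [PySem.Dict.get?_setdefault_of_ne _ _ (fun h => hv h.symm)]
        congr 1
        simp [hv]

-- ---------- characterisation of the built indexes ----------

lemma buildWord_eq (st : PySem.Dict (List Char) Int × PySem.Dict (List Char) Int ×
      PySem.Dict (Int × List Char) (List (Int × Char)) × Int) (n : Int) (d : String) :
    pvBuildWord st (n, d) =
      (st.1.setdefault (PySem.Chars.lower d.toList) n,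
       (List.range (PySem.Chars.lower d.toList).length).foldl
         (fun dd k => dd.setdefault (pvDel (PySem.Chars.lower d.toList) k) n) st.2.1,
       ((List.range (PySem.Chars.lower d.toList).length).map
           (fun (k : Nat) => (((k : Int), pvDel (PySem.Chars.lower d.toList) k),
                      (n, (PySem.Chars.lower d.toList).getD k ' ')))).foldl
         (fun dd p => dd.modify p.1 [] (fun l => l ++ [p.2])) st.2.2.1,
       if PySem.Chars.len (PySem.Chars.lower d.toList) > st.2.2.2
         then PySem.Chars.len (PySem.Chars.lower d.toList) else st.2.2.2) := by
  have hrw : pvBuildWord st (n, d)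
      = (PySem.List.pyRange 0 (PySem.Chars.len (PySem.Chars.lower d.toList)) 1).foldl
        (fun st i =>
          (st.1,
           st.2.1.setdefault (PySem.List.slice (PySem.Chars.lower d.toList) none (some i)
             ++ PySem.List.slice (PySem.Chars.lower d.toList) (some (i + 1)) none) n,
           st.2.2.1.modify (i, PySem.List.slice (PySem.Chars.lower d.toList) none (some i)
             ++ PySem.List.slice (PySem.Chars.lower d.toList) (some (i + 1)) none) []
             (fun l => l ++ [(n, PySem.List.pyGetD (PySem.Chars.lower d.toList) i ' ')]),
           st.2.2.2))
        (st.1.setdefault (PySem.Chars.lower d.toList) n, st.2.1, st.2.2.1,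
         if PySem.Chars.len (PySem.Chars.lower d.toList) > st.2.2.2
           then PySem.Chars.len (PySem.Chars.lower d.toList) else st.2.2.2) := rfl
  rw [hrw,
    show PySem.List.pyRange 0 (PySem.Chars.len (PySem.Chars.lower d.toList)) 1
      = List.map (fun (k : Nat) => (k : Int)) (List.range (PySem.Chars.lower d.toList).length)
      from by
      rw [show PySem.Chars.len (PySem.Chars.lower d.toList)
          = (((PySem.Chars.lower d.toList).length : Int)) from by simp [pysem]]
      exact PySem.List.pyRange_zero_natCast _,
    List.foldl_map]
  have hbody : (fun (st : PySem.Dict (List Char) Int × PySem.Dict (List Char) Int ×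
        PySem.Dict (Int × List Char) (List (Int × Char)) × Int) (k : Nat) =>
      (st.1,
       st.2.1.setdefault (PySem.List.slice (PySem.Chars.lower d.toList) none (some ((k : Int)))
         ++ PySem.List.slice (PySem.Chars.lower d.toList) (some ((k : Int) + 1)) none) n,
       st.2.2.1.modify (((k : Int)), PySem.List.slice (PySem.Chars.lower d.toList) none (some ((k : Int)))
         ++ PySem.List.slice (PySem.Chars.lower d.toList) (some ((k : Int) + 1)) none) []
         (fun l => l ++ [(n, PySem.List.pyGetD (PySem.Chars.lower d.toList) ((k : Int)) ' ')]),
       st.2.2.2))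
      = fun st k =>
        (st.1, st.2.1.setdefault (pvDel (PySem.Chars.lower d.toList) k) n,
         st.2.2.1.modify (((k : Int)), pvDel (PySem.Chars.lower d.toList) k)
           [] (fun l => l ++ [(n, (PySem.Chars.lower d.toList).getD k ' ')]),
         st.2.2.2) := by
    funext st k
    have hv : PySem.List.slice (PySem.Chars.lower d.toList) none (some ((k : Int)))
        ++ PySem.List.slice (PySem.Chars.lower d.toList) (some ((k : Int) + 1)) none
        = pvDel (PySem.Chars.lower d.toList) k := by
      rw [PySem.List.slice_to_natCast,
        show ((k : Int) + 1) = (((k + 1 : Nat)) : Int) from by push_cast; ring,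
        PySem.List.slice_from_natCast]
      rfl
    simp only [hv, PySem.List.pyGetD_natCast]
  rw [hbody]
  have hsplit : ∀ (L : List Nat) (a : PySem.Dict (List Char) Int)
      (b : PySem.Dict (List Char) Int) (c : PySem.Dict (Int × List Char) (List (Int × Char)))
      (m : Int),
      L.foldl (fun st k =>
        (st.1, st.2.1.setdefault (pvDel (PySem.Chars.lower d.toList) k) n,
         st.2.2.1.modify (((k : Int)), pvDel (PySem.Chars.lower d.toList) k)
           [] (fun l => l ++ [(n, (PySem.Chars.lower d.toList).getD k ' ')]),
         st.2.2.2)) (a, b, c, m)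
      = (a, L.foldl (fun dd k => dd.setdefault (pvDel (PySem.Chars.lower d.toList) k) n) b,
         L.foldl (fun dd k => dd.modify (((k : Int)), pvDel (PySem.Chars.lower d.toList) k)
           [] (fun l => l ++ [(n, (PySem.Chars.lower d.toList).getD k ' ')])) c, m) := by
    intro L
    induction L with
    | nil => intro a b c m; rfl
    | cons k L ih =>
        intro a b c m
        simp only [List.foldl_cons]
        exact ih _ _ _ _
  rw [hsplit, List.foldl_map]

lemma buildSt_nil :
    pvBuildSt [] = (PySem.Dict.empty, PySem.Dict.empty, PySem.Dict.empty, 0) := rfl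

lemma buildSt_append (t : List String) (d : String) :
    pvBuildSt (t ++ [d]) = pvBuildWord (pvBuildSt t) ((t.length : Int), d) := by
  unfold pvBuildSt
  rw [PySem.List.enumerate_append, List.foldl_append]
  simp [PySem.List.enumerate_cons, PySem.List.enumerate_nil]

lemma lowers_append (t : List String) (d : String) :
    pvLowers (t ++ [d]) = pvLowers t ++ [PySem.Chars.lower d.toList] := by
  simp [pvLowers]

lemma lowers_length (t : List String) : (pvLowers t).length = t.length := by
  simp [pvLowers]

lemma build_ex (cs : List String) (v : List Char) :
    (pvBuildSt cs).1.get? v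
      = ((PySem.List.enumerate (pvLowers cs) 0).find? (fun jd => jd.2 == v)).map (·.1) := by
  induction cs using List.reverseRecOn with
  | nil => simp [buildSt_nil, pvLowers, PySem.List.enumerate_nil]
  | append_singleton t d ih =>
      rw [buildSt_append, buildWord_eq]
      show ((pvBuildSt t).1.setdefault (PySem.Chars.lower d.toList) ((t.length : Int))).get? v = _
      rw [lowers_append, PySem.List.enumerate_append, List.find?_append, Option.map_or,
        lowers_length]
      rw [PySem.List.enumerate_cons, List.find?_cons]
      by_cases hv : v = PySem.Chars.lower d.toList
      · subst hv
        rw [PySem.Dict.get?_setdefault_self, ih]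
        simp only [beq_self_eq_true]
        cases hf : ((PySem.List.enumerate (pvLowers t) 0).find?
            (fun jd => jd.2 == PySem.Chars.lower d.toList)) with
        | none => simp
        | some jd => simp
      · rw [PySem.Dict.get?_setdefault_of_ne _ _ hv, ih]
        simp only [show (PySem.Chars.lower d.toList == v) = false from by
          simpa using (fun h => hv h.symm)]
        simp [PySem.List.enumerate_nil]

lemma build_d1 (cs : List String) (v : List Char) :
    (pvBuildSt cs).2.1.get? v
      = ((PySem.List.enumerate (pvLowers cs) 0).find?
          (fun jd => (List.range jd.2.length).any (fun i => pvDel jd.2 i == v))).map (·.1) := by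
  induction cs using List.reverseRecOn with
  | nil => simp [buildSt_nil, pvLowers, PySem.List.enumerate_nil]
  | append_singleton t d ih =>
      rw [buildSt_append, buildWord_eq]
      show ((List.range (PySem.Chars.lower d.toList).length).foldl
          (fun dd k => dd.setdefault (pvDel (PySem.Chars.lower d.toList) k) ((t.length : Int)))
          (pvBuildSt t).2.1).get? v = _
      rw [get?_foldl_setdefault_key, ih, lowers_append, PySem.List.enumerate_append,
        List.find?_append, Option.map_or, lowers_length, PySem.List.enumerate_cons,
        List.find?_cons]
      congr 1
      by_cases hc : ((List.range (PySem.Chars.lower d.toList).length).any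
          (fun k => pvDel (PySem.Chars.lower d.toList) k == v)) = true
      · rw [if_pos hc]
        simp only [hc]
        simp
      · rw [if_neg hc]
        simp only [Bool.not_eq_true] at hc
        simp only [hc]
        simp [PySem.List.enumerate_nil]

lemma filter_range_single (m i0 : Nat) (q : Nat → Bool) :
    (List.range m).filter (fun k => decide (k = i0) && q k)
      = if i0 < m ∧ q i0 = true then [i0] else [] := by
  induction m with
  | zero => simp
  | succ m ih =>
      rw [List.range_succ, List.filter_append, ih]
      by_cases h1 : m = i0
      · subst h1
        by_cases hq : q m = true
        · rw [if_neg (by omega), if_pos ⟨by omega, hq⟩]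
          simp [hq]
        · rw [if_neg (by simp [hq]), if_neg (by simp [hq])]
          simp [hq]
      · rw [show (List.filter (fun k => decide (k = i0) && q k) [m]) = [] from by
          simp [h1]]
        rw [List.append_nil]
        by_cases h2 : i0 < m ∧ q i0 = true
        · rw [if_pos h2, if_pos ⟨by omega, h2.2⟩]
        · rw [if_neg h2, if_neg (by intro h3; exact h2 ⟨by omega, h3.2⟩)]

lemma build_sb (cs : List String) (i0 : Nat) (v : List Char) :
    (pvBuildSt cs).2.2.1.getD ((i0 : Int), v) []
      = (PySem.List.enumerate (pvLowers cs) 0).filterMap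
          (fun jd => if i0 < jd.2.length ∧ pvDel jd.2 i0 = v
            then some (jd.1, jd.2.getD i0 ' ') else none) := by
  induction cs using List.reverseRecOn with
  | nil => simp [buildSt_nil, pvLowers, PySem.List.enumerate_nil]
  | append_singleton t d ih =>
      rw [buildSt_append, buildWord_eq]
      show (((List.range (PySem.Chars.lower d.toList).length).map
          (fun (k : Nat) => (((k : Int), pvDel (PySem.Chars.lower d.toList) k),
                      (((t.length : Int)), (PySem.Chars.lower d.toList).getD k ' ')))).foldl
          (fun dd p => dd.modify p.1 [] (fun l => l ++ [p.2])) (pvBuildSt t).2.2.1).getD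
          ((i0 : Int), v) [] = _
      rw [PySem.Dict.getD_foldl_modify_append, ih, lowers_append, PySem.List.enumerate_append,
        List.filterMap_append, lowers_length, PySem.List.enumerate_cons]
      congr 1
      rw [List.filter_map,
        List.filter_congr (l := List.range (PySem.Chars.lower d.toList).length)
          (q := fun k => decide (k = i0) && decide (pvDel (PySem.Chars.lower d.toList) k = v))
          (by
            intro k _
            show ((((k : Int), pvDel (PySem.Chars.lower d.toList) k),
                (((t.length : Int)), (PySem.Chars.lower d.toList).getD k ' ')).1
                == ((i0 : Int), v))
              = (decide (k = i0) && decide (pvDel (PySem.Chars.lower d.toList) k = v))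
            simp [beq_eq_decide, Nat.cast_inj]),
        filter_range_single]
      by_cases hc : i0 < (PySem.Chars.lower d.toList).length ∧
          pvDel (PySem.Chars.lower d.toList) i0 = v
      · rw [if_pos ⟨hc.1, by simp [hc.2]⟩]
        simp only [List.map_cons, List.map_nil, List.filterMap_cons, List.filterMap_nil,
          PySem.List.enumerate_nil]
        rw [if_pos hc]
        simp
      · rw [if_neg (by
          intro h3
          exact hc ⟨h3.1, by simpa using h3.2⟩)]
        simp only [List.map_nil, PySem.List.enumerate_nil]
        simp [hc]

lemma build_maxlen (cs : List String) :
    ∀ dl ∈ pvLowers cs, (dl.length : Int) ≤ (pvBuildSt cs).2.2.2 := by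
  induction cs using List.reverseRecOn with
  | nil => simp [pvLowers]
  | append_singleton t d ih =>
      rw [buildSt_append, buildWord_eq]
      intro dl hdl
      rw [lowers_append] at hdl
      have hlen : PySem.Chars.len (PySem.Chars.lower d.toList)
          = (((PySem.Chars.lower d.toList).length : Int)) := by simp [pysem]
      show (dl.length : Int) ≤ (if PySem.Chars.len (PySem.Chars.lower d.toList)
          > (pvBuildSt t).2.2.2 then PySem.Chars.len (PySem.Chars.lower d.toList)
          else (pvBuildSt t).2.2.2)
      rw [hlen]
      rcases List.mem_append.mp hdl with h | h
      · have := ih dl h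
        split_ifs with hc
        · omega
        · exact this
      · obtain rfl : dl = PySem.Chars.lower d.toList := by simpa using h
        split_ifs with hc
        · omega
        · omega

lemma Ed1_len {w d : List Char} (h : Ed1 w d) : w.length ≤ d.length + 1 := by
  rcases h with ⟨i, hi, hdel⟩ | ⟨i, hi, heq | ⟨hid, hdeq, _⟩⟩
  · have := congrArg List.length hdel
    rw [pvDel_length hi] at this
    omega
  · have := congrArg List.length heq
    rw [pvDel_length hi] at this
    omega
  · have h1 := congrArg List.length hdeq
    rw [pvDel_length hid, pvDel_length hi] at h1
    omega

-- ---------- lookup-side reductions ----------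

lemma omin_none (b : Option Int) : pvOmin b none = b := by cases b <;> rfl

lemma bestUpd_eq (b : Option Int) (j : Int) : pvBestUpd b j = pvOmin b (some j) := by
  cases b with
  | none => rfl
  | some x =>
      simp only [pvBestUpd, pvOmin]
      split_ifs with h <;> (congr 1; omega)

lemma subScan_eq (entries : List (Int × Char)) (c0 : Char) (b : Option Int) :
    pvSubScan entries c0 b
      = pvOmin b ((entries.find? (fun e => e.2 != c0)).map (·.1)) := by
  induction entries with
  | nil => simp [pvSubScan, omin_none]
  | cons e rest ih =>
      obtain ⟨j, c⟩ := e
      rw [show pvSubScan ((j, c) :: rest) c0 b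
          = if c ≠ c0 then pvBestUpd b j else pvSubScan rest c0 b from rfl]
      by_cases hc : c = c0
      · rw [if_neg (by simp [hc]), List.find?_cons_of_neg (by simp [hc]), ih]
      · rw [if_pos hc, List.find?_cons_of_pos (by simp [hc]), bestUpd_eq]
        rfl

lemma omin_assoc (a b c : Option Int) : pvOmin (pvOmin a b) c = pvOmin a (pvOmin b c) := by
  cases a <;> cases b <;> cases c <;> simp [pvOmin, min_assoc]

lemma find?_idx_ge {α : Type} (xs : List α) (s : Int) (p : Int × α → Bool) (jd : Int × α)
    (h : (PySem.List.enumerate xs s).find? p = some jd) : s ≤ jd.1 := by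
  have hmem := List.mem_of_find?_eq_some h
  rw [PySem.List.mem_enumerate_iff] at hmem
  obtain ⟨k, hk, rfl⟩ := hmem
  show s ≤ s + (k : Int)
  omega

lemma omin_find?_enum {α : Type} (xs : List α) (s : Int) (p q : α → Bool) :
    pvOmin (((PySem.List.enumerate xs s).find? (fun jd => p jd.2)).map (·.1))
           (((PySem.List.enumerate xs s).find? (fun jd => q jd.2)).map (·.1))
      = ((PySem.List.enumerate xs s).find? (fun jd => p jd.2 || q jd.2)).map (·.1) := by
  induction xs generalizing s with
  | nil => simp [PySem.List.enumerate_nil, pvOmin]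
  | cons x xs ih =>
      rw [PySem.List.enumerate_cons]
      simp only [List.find?_cons]
      by_cases hp : p x = true
      · by_cases hq : q x = true
        · simp only [hp, hq]
          simp [pvOmin]
        · simp only [hp, Bool.not_eq_true] at hq ⊢
          simp only [hq, Bool.true_or]
          cases hfq : ((PySem.List.enumerate xs (s + 1)).find? (fun jd => q jd.2)) with
          | none => simp [pvOmin]
          | some jd =>
              have := find?_idx_ge _ _ _ _ hfq
              simp only [Option.map_some]
              simp only [pvOmin]
              congr 1
              omega
      · simp only [Bool.not_eq_true] at hp
        by_cases hq : q x = true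
        · simp only [hp, hq, Bool.false_or]
          cases hfp : ((PySem.List.enumerate xs (s + 1)).find? (fun jd => p jd.2)) with
          | none => simp [pvOmin]
          | some jd =>
              have := find?_idx_ge _ _ _ _ hfp
              simp only [Option.map_some]
              simp only [pvOmin]
              congr 1
              omega
        · simp only [Bool.not_eq_true] at hq
          simp only [hp, hq, Bool.false_or]
          exact ih (s + 1)

lemma foldl_omin_enum {α ι : Type} (L : List ι) (xs : List α) (s : Int)
    (p0 : α → Bool) (q : ι → α → Bool) :
    L.foldl (fun best i =>
        pvOmin best (((PySem.List.enumerate xs s).find? (fun jd => q i jd.2)).map (·.1)))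
      (((PySem.List.enumerate xs s).find? (fun jd => p0 jd.2)).map (·.1))
      = ((PySem.List.enumerate xs s).find?
          (fun jd => p0 jd.2 || L.any (fun i => q i jd.2))).map (·.1) := by
  induction L generalizing p0 with
  | nil => simp
  | cons i L ih =>
      rw [List.foldl_cons, omin_find?_enum, ih (fun x => p0 x || q i x)]
      have hfun : (fun (jd : Int × α) => (p0 jd.2 || q i jd.2) || L.any (fun i' => q i' jd.2))
          = (fun (jd : Int × α) => p0 jd.2 || (i :: L).any (fun i' => q i' jd.2)) := by
        funext jd
        simp [Bool.or_assoc]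
      rw [hfun]

lemma find?_filterMap_pairs {α β : Type} (l : List (Int × α)) (cond : α → Prop)
    [DecidablePred cond] (val : α → β) (test : β → Bool) :
    ((l.filterMap (fun jd => if cond jd.2 then some (jd.1, val jd.2) else none)).find?
        (fun e => test e.2)).map (·.1)
      = (l.find? (fun jd => decide (cond jd.2) && test (val jd.2))).map (·.1) := by
  induction l with
  | nil => simp
  | cons jd l ih =>
      rw [List.filterMap_cons, List.find?_cons]
      by_cases hc : cond jd.2
      · simp only [if_pos hc, decide_eq_true hc, Bool.true_and]
        rw [List.find?_cons]
        by_cases ht : test (val jd.2) = true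
        · simp [ht]
        · simp only [Bool.not_eq_true] at ht
          simp only [ht]
          exact ih
      · simp only [if_neg hc, decide_eq_false hc, Bool.false_and]
        exact ih

lemma enumerate_map {α β : Type} (f : α → β) (xs : List α) (s : Int) :
    PySem.List.enumerate (xs.map f) s
      = (PySem.List.enumerate xs s).map (fun jd => (jd.1, f jd.2)) := by
  induction xs generalizing s with
  | nil => simp [PySem.List.enumerate_nil]
  | cons x xs ih => simp [PySem.List.enumerate_cons, ih]

lemma lookup_eq (cs : List String) (wl : List Char) :
    pvLookup wl (pvBuildSt cs).1 (pvBuildSt cs).2.1 (pvBuildSt cs).2.2.1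
      = ((PySem.List.enumerate (pvLowers cs) 0).find? (fun jd => pvBigPred wl jd.2)).map (·.1) := by
  have hrw : pvLookup wl (pvBuildSt cs).1 (pvBuildSt cs).2.1 (pvBuildSt cs).2.2.1
      = (PySem.List.pyRange 0 (PySem.Chars.len wl) 1).foldl
        (fun best i =>
          pvSubScan ((pvBuildSt cs).2.2.1.getD (i, PySem.List.slice wl none (some i)
              ++ PySem.List.slice wl (some (i + 1)) none) [])
            (PySem.List.pyGetD wl i ' ')
            (match (pvBuildSt cs).1.get? (PySem.List.slice wl none (some i)
                ++ PySem.List.slice wl (some (i + 1)) none) with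
             | some j => pvBestUpd best j
             | none => best))
        ((pvBuildSt cs).2.1.get? wl) := rfl
  rw [hrw,
    show PySem.List.pyRange 0 (PySem.Chars.len wl) 1
      = List.map (fun (k : Nat) => (k : Int)) (List.range wl.length) from by
      rw [show PySem.Chars.len wl = ((wl.length : Int)) from by simp [pysem]]
      exact PySem.List.pyRange_zero_natCast _,
    List.foldl_map, build_d1]
  have hbody : (fun (best : Option Int) (k : Nat) =>
      pvSubScan ((pvBuildSt cs).2.2.1.getD (((k : Int)), PySem.List.slice wl none (some ((k : Int)))
          ++ PySem.List.slice wl (some ((k : Int) + 1)) none) [])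
        (PySem.List.pyGetD wl ((k : Int)) ' ')
        (match (pvBuildSt cs).1.get? (PySem.List.slice wl none (some ((k : Int)))
            ++ PySem.List.slice wl (some ((k : Int) + 1)) none) with
         | some j => pvBestUpd best j
         | none => best))
      = fun best k =>
        pvOmin best (((PySem.List.enumerate (pvLowers cs) 0).find?
          (fun jd => (jd.2 == pvDel wl k) ||
            (decide (k < jd.2.length ∧ pvDel jd.2 k = pvDel wl k)
              && (jd.2.getD k ' ' != wl.getD k ' ')))).map (·.1)) := by
    funext best k
    have hv : PySem.List.slice wl none (some ((k : Int)))
        ++ PySem.List.slice wl (some ((k : Int) + 1)) none = pvDel wl k := by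
      rw [PySem.List.slice_to_natCast,
        show ((k : Int) + 1) = (((k + 1 : Nat)) : Int) from by push_cast; ring,
        PySem.List.slice_from_natCast]
      rfl
    simp only [hv, PySem.List.pyGetD_natCast]
    have hm : (match (pvBuildSt cs).1.get? (pvDel wl k) with
        | some j => pvBestUpd best j
        | none => best) = pvOmin best ((pvBuildSt cs).1.get? (pvDel wl k)) := by
      cases h : (pvBuildSt cs).1.get? (pvDel wl k) with
      | none => simp [omin_none]
      | some j => simp [bestUpd_eq]
    rw [subScan_eq, hm, build_ex, build_sb,
      find?_filterMap_pairs (PySem.List.enumerate (pvLowers cs) 0)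
        (fun dl => k < dl.length ∧ pvDel dl k = pvDel wl k)
        (fun dl => dl.getD k ' ') (fun c => c != wl.getD k ' '),
      omin_assoc,
      omin_find?_enum (pvLowers cs) 0 (fun dl => dl == pvDel wl k)
        (fun dl => decide (k < dl.length ∧ pvDel dl k = pvDel wl k)
          && (dl.getD k ' ' != wl.getD k ' '))]
  rw [hbody,
    foldl_omin_enum (List.range wl.length) (pvLowers cs) 0
      (fun dl => (List.range dl.length).any (fun i => pvDel dl i == wl))
      (fun k dl => (dl == pvDel wl k) ||
        (decide (k < dl.length ∧ pvDel dl k = pvDel wl k)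
          && (dl.getD k ' ' != wl.getD k ' ')))]
  rfl

-- ---------- A-side first-match characterisation ----------

lemma innerA_eq (w : List Char) (cs : List String) (s : Int) :
    pvInnerA w cs
      = (match (PySem.List.enumerate cs s).find?
            (fun jd => min (pvFindMismatch w jd.2.toList) (pvSingleInsDel w jd.2.toList) == 1) with
         | some jd => jd.2.toList
         | none => w) := by
  induction cs generalizing s with
  | nil => simp [pvInnerA, PySem.List.enumerate_nil]
  | cons d rest ih =>
      rw [PySem.List.enumerate_cons]
      by_cases h : (min (pvFindMismatch w d.toList) (pvSingleInsDel w d.toList) == 1) = true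
      · rw [show List.find?
              (fun jd => min (pvFindMismatch w jd.2.toList) (pvSingleInsDel w jd.2.toList) == 1)
              ((s, d) :: PySem.List.enumerate rest (s + 1)) = some (s, d) from
            List.find?_cons_of_pos h]
        simp [pvInnerA, h]
      · rw [show List.find?
              (fun jd => min (pvFindMismatch w jd.2.toList) (pvSingleInsDel w jd.2.toList) == 1)
              ((s, d) :: PySem.List.enumerate rest (s + 1))
            = List.find?
              (fun jd => min (pvFindMismatch w jd.2.toList) (pvSingleInsDel w jd.2.toList) == 1)
              (PySem.List.enumerate rest (s + 1)) from
            List.find?_cons_of_neg (by simpa using h)]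
        simp only [pvInnerA]
        rw [if_neg (by simpa using h)]
        exact ih (s + 1)

-- ---------- the per-word equality ----------

lemma predA_eq (w d : List Char) :
    (min (pvFindMismatch w d) (pvSingleInsDel w d) == 1)
      = pvBigPred (PySem.Chars.lower w) (PySem.Chars.lower d) := by
  rw [fm_eq, sid_eq, bigPred_eq_dist1, Bool.eq_iff_iff, beq_iff_eq]
  exact (pair_iff _ _).trans (by simp)

lemma core_eq (cs : List String) (w : List Char) :
    pvInnerA w cs
      = (if PySem.Chars.len (PySem.Chars.lower w) > (pvBuildSt cs).2.2.2 + 1 then w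
         else match pvLookup (PySem.Chars.lower w) (pvBuildSt cs).1 (pvBuildSt cs).2.1
            (pvBuildSt cs).2.2.1 with
         | none => w
         | some j => (PySem.List.pyGetD cs j "").toList) := by
  have hlenw : PySem.Chars.len (PySem.Chars.lower w)
      = (((PySem.Chars.lower w).length : Int)) := by simp [pysem]
  by_cases hg : PySem.Chars.len (PySem.Chars.lower w) > (pvBuildSt cs).2.2.2 + 1
  · rw [if_pos hg, innerA_eq w cs 0]
    have hnone : ((PySem.List.enumerate cs 0).find?
        (fun jd => min (pvFindMismatch w jd.2.toList) (pvSingleInsDel w jd.2.toList) == 1))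
        = none := by
      rw [List.find?_eq_none]
      intro jd hjd
      rw [predA_eq w jd.2.toList]
      have hmem : PySem.Chars.lower jd.2.toList ∈ pvLowers cs := by
        rw [PySem.List.mem_enumerate_iff] at hjd
        obtain ⟨k, hk, rfl⟩ := hjd
        exact List.mem_map.mpr ⟨cs[k], List.getElem_mem hk, rfl⟩
      have hmax := build_maxlen cs _ hmem
      rw [hlenw] at hg
      intro hcon
      have hed := (bigPred_iff _ _).mp hcon
      have hlen2 := Ed1_len hed
      omega
    rw [hnone]
  · rw [if_neg hg]
    rw [lookup_eq, innerA_eq w cs 0,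
      show pvLowers cs = cs.map (fun d => PySem.Chars.lower d.toList) from rfl,
      enumerate_map, List.find?_map]
    have hpred : ((fun jd => pvBigPred (PySem.Chars.lower w) jd.2) ∘
          (fun (jd : Int × String) => (jd.1, PySem.Chars.lower jd.2.toList)))
        = fun (jd : Int × String) =>
          min (pvFindMismatch w jd.2.toList) (pvSingleInsDel w jd.2.toList) == 1 := by
      funext jd
      simp only [Function.comp]
      exact (predA_eq w jd.2.toList).symm
    rw [hpred]
    cases hf : ((PySem.List.enumerate cs 0).find?
        (fun jd => min (pvFindMismatch w jd.2.toList) (pvSingleInsDel w jd.2.toList) == 1)) with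
    | none => simp
    | some jd =>
        simp only [Option.map_some, Option.map_some]
        have hmem := List.mem_of_find?_eq_some hf
        rw [PySem.List.mem_enumerate_iff] at hmem
        obtain ⟨k, hk, rfl⟩ := hmem
        show (cs[k]).toList = (PySem.List.pyGetD cs (0 + (k : Int)) "").toList
        rw [show ((0 : Int) + (k : Int)) = ((k : Int)) from by ring, PySem.List.pyGetD_natCast,
          List.getD_eq_getElem cs "" hk]

-- ---------- assembly of the output string ----------

-- proof-side name for B's per-word function
def pvWordB (cs : List String) (w : List Char) : List Char :=
  if PySem.Chars.len w ≤ 2 || cs.any (fun d => d.toList == w) then w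
  else if PySem.Chars.len (PySem.Chars.lower w) > (pvBuildSt cs).2.2.2 + 1 then w
  else
    match pvLookup (PySem.Chars.lower w) (pvBuildSt cs).1 (pvBuildSt cs).2.1
        (pvBuildSt cs).2.2.1 with
    | none => w
    | some j => (PySem.List.pyGetD cs j "").toList


lemma flatMap_sp (ps : List (List Char)) :
    ps.flatMap (fun p => ' ' :: p)
      = if ps = [] then [] else ' ' :: PySem.Chars.join [' '] ps := by
  induction ps with
  | nil => rfl
  | cons p rest ih =>
      cases rest with
      | nil => simp [PySem.Chars.join_singleton]
      | cons q t =>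
          simp only [List.flatMap_cons] at ih ⊢
          rw [ih]
          simp [PySem.Chars.join_cons_cons]

lemma strip_cons_space (t : List Char) :
    PySem.Chars.strip (' ' :: t) = PySem.Chars.strip t := by
  simp [PySem.Chars.strip, PySem.Chars.lstrip, List.dropWhile,
    show PySem.Chars.isspace ' ' = true from by decide]

-- ===== VERDICT (by name: the statement is the Claim_ definition above) =====
theorem func_spec : Claim_equal_func := by
  intro s cs _
  show func s cs = func_alt s cs
  have halt : func_alt s cs
      = String.ofList (PySem.Chars.lower (PySem.Chars.strip (PySem.Chars.join [' ']
          ((PySem.Chars.split₀ (PySem.Chars.strip s.toList)).map (pvWordB cs))))) := by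
    unfold func_alt pvWordB pvBuildSt
    rfl
  rw [halt]
  unfold func
  simp only []
  have hbody : (fun (acc w : List Char) =>
      if PySem.Chars.len w ≤ 2 || cs.any (fun d => d.toList == w)
      then acc ++ ' ' :: w
      else acc ++ ' ' :: pvInnerA w cs)
      = fun acc w => acc ++ ' ' :: pvWordB cs w := by
    funext acc w
    unfold pvWordB
    split
    · rfl
    · rw [core_eq]
  rw [hbody,
    PySem.List.foldl_append_eq_flatMap (fun w => ' ' :: pvWordB cs w),
    List.nil_append,
    show ((PySem.Chars.split₀ (PySem.Chars.strip s.toList)).flatMap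
        (fun w => ' ' :: pvWordB cs w))
      = (((PySem.Chars.split₀ (PySem.Chars.strip s.toList)).map (pvWordB cs)).flatMap
          (fun p => ' ' :: p))
      from (List.flatMap_map _ _ _).symm,
    flatMap_sp]
  split
  · rename_i h; rw [h, PySem.Chars.join_nil]
  · rw [strip_cons_space]
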